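-- pv_equiv track=rewrite | github.com/Kris-Sekula/EPROM-EMU-NG | Software/EPROM_NG_v2.0rc3_cli_only.py | packetData
-- ===== SOURCE A (Python) =====
-- def packetData(mapped):
-- 	data=[]
-- 	"""
-- 	create a list of tuples [(start_address,size),(start_address,size),...,(start_address,size)] ... size can be 128,256,384,512
-- 	in other words find continues ranges of 128Byte data that has changed, group into packets of 128-512 bytes, create a list for later processing
-- 	"""
-- 	n=0
-- 	col=0
-- 	start=-2
-- 	for idx in range(len(mapped)):
-- 		if mapped[idx] == 1:
-- 			if n == 0:
-- 				start = idx*128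
-- 			n+=1
-- 			if n == 4:
-- 				data.append((start,512))
-- 				n=0
-- 		else:
-- 			if n > 0:
-- 				start = (idx-n)*128
-- 				data.append((start,n*128))
-- 			n=0
-- 			start = -2
-- 	return data
-- ===== SOURCE B (Python) =====
-- def packetData(mapped):
--     # pass 1: maximal runs of consecutive changed blocks as (start_block, length)
--     runs = []
--     run = 0
--     for i, v in enumerate(mapped):
--         if v == 1:
--             run += 1
--         else:
--             if run:
--                 runs.append((i - run, run))
--             run = 0
--     if run:
--         runs.append((len(mapped) - run, run))
--     # pass 2: packetize each run into full 512B packets plus a remainder packet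
--     data = []
--     for s, L in runs:
--         q, r = divmod(L, 4)
--         for k in range(q):
--             data.append(((s + 4 * k) * 128, 512))
--         if r:
--             data.append(((s + 4 * q) * 128, r * 128))
--     return data
-- ===== Notes on version B (the rewrite author's own statement) =====
-- stated objective: alternative
-- what changed: A interleaves packet emission with a single stateful scan counting blocks mod 4; B first extracts the maximal runs of consecutive 1s as (start, length) pairs and then packetizes each run arithmetically with divmod(L, 4).
-- intended difference: On lists ending in a run of 1s whose length is not a multiple of 4, A never flushes after its loop and so silently drops the final 128-384B remainder packet, while B emits it; emitting every changed block is the intended behaviour of the packetizer. — e.g. on packetData([1]): A returns [], B returns [(0, 128)]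
import Mathlib
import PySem

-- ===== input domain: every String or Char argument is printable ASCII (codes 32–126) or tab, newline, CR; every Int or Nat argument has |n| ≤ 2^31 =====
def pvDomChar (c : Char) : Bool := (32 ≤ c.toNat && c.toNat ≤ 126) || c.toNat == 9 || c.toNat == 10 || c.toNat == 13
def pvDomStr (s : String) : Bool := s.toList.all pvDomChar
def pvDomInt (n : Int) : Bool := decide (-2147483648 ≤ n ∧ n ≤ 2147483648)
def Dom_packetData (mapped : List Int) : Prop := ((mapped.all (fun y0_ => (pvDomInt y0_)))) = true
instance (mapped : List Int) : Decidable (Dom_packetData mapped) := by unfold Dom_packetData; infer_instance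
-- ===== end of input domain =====

-- B re-implements A in two passes (extract runs of 1s, then packetize each run by division);
-- on lists ending in a partial run A drops the final remainder packet, B emits it (stated as D_ below).

-- ===== PORT A =====
-- loop body of A's for-loop; state = (data, n, start), p = (idx, mapped[idx])
def stepA (st : List (Int × Int) × Int × Int) (p : Int × Int) : List (Int × Int) × Int × Int :=
  if p.2 = 1 then
    let start := if st.2.1 = 0 then p.1 * 128 else st.2.2
    let n := st.2.1 + 1
    if n = 4 then (st.1 ++ [(start, 512)], 0, start) else (st.1, n, start)
  else
    if st.2.1 > 0 then (st.1 ++ [((p.1 - st.2.1) * 128, st.2.1 * 128)], 0, -2)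
    else (st.1, 0, -2)

def packetData (mapped : List Int) : List (Int × Int) :=
  -- 'for idx in range(len(mapped)) … mapped[idx]': idx is always in range, so pyGetD is exact
  ((PySem.List.pyRange 0 (PySem.List.len mapped) 1).foldl
     (fun st idx => stepA st (idx, PySem.List.pyGetD mapped idx 0))
     ([], 0, -2)).1

-- ===== PORT B =====
-- pass-1 loop body of B: state = (runs, run)
def runStep (st : List (Int × Int) × Int) (p : Int × Int) : List (Int × Int) × Int :=
  if p.2 = 1 then (st.1, st.2 + 1)
  else if st.2 ≠ 0 then (st.1 ++ [(p.1 - st.2, st.2)], 0) else (st.1, 0)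

-- pass-2 loop body of B: packets of one run sl = (s, L)
def emitStep (data : List (Int × Int)) (sl : Int × Int) : List (Int × Int) :=
  let q := PySem.Int.floordiv sl.2 4
  let r := PySem.Int.mod sl.2 4
  let data := (PySem.List.pyRange 0 q 1).foldl (fun d k => d ++ [((sl.1 + 4 * k) * 128, 512)]) data
  if r ≠ 0 then data ++ [((sl.1 + 4 * q) * 128, r * 128)] else data

def packetData_alt (mapped : List Int) : List (Int × Int) :=
  let st := (PySem.List.enumerate mapped).foldl runStep ([], 0)
  let runs := if st.2 ≠ 0 then st.1 ++ [((mapped.length : Int) - st.2, st.2)] else st.1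
  runs.foldl emitStep []

-- ===== PRECONDITION & SPEC =====
-- length of the maximal suffix of 1s of the input (inspects the input only)
def trailOnes : List Int → Nat
  | [] => 0
  | x :: xs => if x = 1 ∧ xs.all (fun y => y == 1) then xs.length + 1 else trailOnes xs

-- On lists ending in a run of 1s whose length is not a multiple of 4, A never flushes after its
-- loop and silently drops the final remainder packet, while B emits it; B's value is intended.
def D_packetData (mapped : List Int) : Prop := trailOnes mapped % 4 ≠ 0
instance (mapped : List Int) : Decidable (D_packetData mapped) := by unfold D_packetData; infer_instance

def Spec_packetData (mapped : List Int) (out : List (Int × Int)) : Prop := ¬ D_packetData mapped → out = packetData_alt mapped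
instance (mapped : List Int) (out : List (Int × Int)) : Decidable (Spec_packetData mapped out) := by unfold Spec_packetData; infer_instance

def pvDiffWitness_packetData : List Int := [1]
def pvDiffWitnessOut_packetData : (List (Int × Int)) × (List (Int × Int)) := ([], [(0, 128)])

-- ===== CLAIM (what is proved, stated in full; the proofs are below) =====
def Claim_unchanged_packetData : Prop := ∀ (mapped : List Int), Dom_packetData mapped → Spec_packetData mapped (packetData mapped)
def Claim_changed_packetData : Prop := Dom_packetData (pvDiffWitness_packetData) ∧ D_packetData (pvDiffWitness_packetData) ∧ packetData (pvDiffWitness_packetData) = pvDiffWitnessOut_packetData.1 ∧ packetData_alt (pvDiffWitness_packetData) = pvDiffWitnessOut_packetData.2 ∧ pvDiffWitnessOut_packetData.1 ≠ pvDiffWitnessOut_packetData.2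
def Claim_exact_packetData : Prop := ∀ (mapped : List Int), Dom_packetData mapped → D_packetData mapped → packetData mapped ≠ packetData_alt mapped

-- ===== LEMMAS AND PROOFS =====

-- A's specification: packets A emits while processing the suffix xs at index i with current count n
def fSpec : List Int → Int → Int → List (Int × Int)
  | [], _, _ => []
  | x :: xs, i, n =>
    if x = 1 then
      if n + 1 = 4 then ((i - n) * 128, 512) :: fSpec xs (i + 1) 0
      else fSpec xs (i + 1) (n + 1)
    else
      if n = 0 then fSpec xs (i + 1) 0
      else ((i - n) * 128, n * 128) :: fSpec xs (i + 1) 0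

-- B's specification: same, but the final carried run is flushed at the end
def gSpec : List Int → Int → Int → List (Int × Int)
  | [], i, n => if n = 0 then [] else [((i - n) * 128, n * 128)]
  | x :: xs, i, n =>
    if x = 1 then
      if n + 1 = 4 then ((i - n) * 128, 512) :: gSpec xs (i + 1) 0
      else gSpec xs (i + 1) (n + 1)
    else
      if n = 0 then gSpec xs (i + 1) 0
      else ((i - n) * 128, n * 128) :: gSpec xs (i + 1) 0

lemma fSpec_one_full (xs : List Int) (i n : Int) (h : n + 1 = 4) :
    fSpec (1 :: xs) i n = ((i - n) * 128, 512) :: fSpec xs (i + 1) 0 := by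
  simp [fSpec, h]

lemma fSpec_one_part (xs : List Int) (i n : Int) (h : ¬ n + 1 = 4) :
    fSpec (1 :: xs) i n = fSpec xs (i + 1) (n + 1) := by
  simp [fSpec, h]

lemma fSpec_other (xs : List Int) (x i n : Int) (hx : ¬ x = 1) :
    fSpec (x :: xs) i n
      = (if n = 0 then [] else [((i - n) * 128, n * 128)]) ++ fSpec xs (i + 1) 0 := by
  by_cases h : n = 0 <;> simp [fSpec, hx, h]

lemma gSpec_one_full (xs : List Int) (i n : Int) (h : n + 1 = 4) :
    gSpec (1 :: xs) i n = ((i - n) * 128, 512) :: gSpec xs (i + 1) 0 := by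
  simp [gSpec, h]

lemma gSpec_one_part (xs : List Int) (i n : Int) (h : ¬ n + 1 = 4) :
    gSpec (1 :: xs) i n = gSpec xs (i + 1) (n + 1) := by
  simp [gSpec, h]

lemma gSpec_other (xs : List Int) (x i n : Int) (hx : ¬ x = 1) :
    gSpec (x :: xs) i n
      = (if n = 0 then [] else [((i - n) * 128, n * 128)]) ++ gSpec xs (i + 1) 0 := by
  by_cases h : n = 0 <;> simp [gSpec, hx, h]

-- the 512B packets already completed by a carried run of length r ending just before index i
def donePk (i r : Int) : List (Int × Int) :=
  (PySem.List.pyRange 0 (PySem.Int.floordiv r 4) 1).map (fun k => ((i - r + 4 * k) * 128, 512))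

-- packets of one finished run (s, L)
def emitRun (sl : Int × Int) : List (Int × Int) :=
  (PySem.List.pyRange 0 (PySem.Int.floordiv sl.2 4) 1).map (fun k => ((sl.1 + 4 * k) * 128, 512)) ++
    (if PySem.Int.mod sl.2 4 ≠ 0 then
        [((sl.1 + 4 * PySem.Int.floordiv sl.2 4) * 128, PySem.Int.mod sl.2 4 * 128)]
      else [])

lemma fd4 (r : Int) : PySem.Int.floordiv r 4 = r / 4 :=
  PySem.Int.floordiv_eq_ediv_of_pos (by norm_num)
lemma md4 (r : Int) : PySem.Int.mod r 4 = r % 4 :=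
  PySem.Int.mod_eq_emod_of_pos (by norm_num)

lemma donePk_zero (i : Int) : donePk i 0 = [] := by
  have h : PySem.Int.floordiv 0 4 = 0 := by decide
  simp only [donePk, h, PySem.List.pyRange_one_eq_nil (le_refl (0 : Int)), List.map_nil]

lemma donePk_succ_small (i r : Int) (_hr : 0 ≤ r) (h : r % 4 < 3) :
    donePk (i + 1) (r + 1) = donePk i r := by
  unfold donePk
  rw [fd4, fd4, show (r + 1) / 4 = r / 4 from by omega]
  apply List.map_congr_left
  intro k _
  rw [show i + 1 - (r + 1) = i - r from by ring]

lemma donePk_succ_full (i r : Int) (hr : 0 ≤ r) (h : r % 4 = 3) :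
    donePk (i + 1) (r + 1) = donePk i r ++ [((i - 3) * 128, 512)] := by
  unfold donePk
  rw [fd4, fd4, show (r + 1) / 4 = r / 4 + 1 from by omega,
    PySem.List.pyRange_one_succ_right (Int.ediv_nonneg hr (by norm_num)), List.map_append]
  congr 1
  · apply List.map_congr_left
    intro k _
    rw [show i + 1 - (r + 1) = i - r from by ring]
  · simp only [List.map_cons, List.map_nil]
    rw [show i + 1 - (r + 1) + 4 * (r / 4) = i - 3 from by omega]

-- a finished run that started at block i - r of length r, 0 ≤ r
lemma emitRun_eq (i r : Int) :
    emitRun (i - r, r)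
      = donePk i r ++ (if r % 4 = 0 then [] else [((i - r % 4) * 128, r % 4 * 128)]) := by
  unfold emitRun donePk
  dsimp only
  simp only [md4, fd4]
  congr 1
  by_cases h : r % 4 = 0
  · simp [h]
  · rw [if_pos h, if_neg h, show i - r + 4 * (r / 4) = i - r % 4 from by omega]

-- ----- A-side: the fold over enumerate computes fSpec -----
lemma stepA_fold (xs : List Int) : ∀ (i n start : Int) (data : List (Int × Int)),
    0 ≤ n → n < 4 → (n = 0 ∨ start = (i - n) * 128) →
    ((PySem.List.enumerate xs i).foldl stepA (data, n, start)).1 = data ++ fSpec xs i n := by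
  induction xs with
  | nil => intro i n start data _ _ _; simp [PySem.List.enumerate_nil, fSpec]
  | cons x xs ih =>
    intro i n start data hn0 hn4 hstart
    rw [PySem.List.enumerate_cons, List.foldl_cons]
    by_cases hx : x = 1
    · subst hx
      by_cases h4 : n + 1 = 4
      · have hn3 : n = 3 := by omega
        subst hn3
        have hs : start = (i - 3) * 128 := by
          rcases hstart with h | h
          · omega
          · simpa using h
        have hstep : stepA (data, 3, start) (i, 1) = (data ++ [(start, 512)], 0, start) := by
          norm_num [stepA]
        rw [hstep, ih (i + 1) 0 start _ le_rfl (by norm_num) (Or.inl rfl),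
          fSpec_one_full xs i 3 (by norm_num)]
        simp [hs]
      · by_cases hz : n = 0
        · subst hz
          have hstep : stepA (data, 0, start) (i, 1) = (data, 1, i * 128) := by
            norm_num [stepA]
          rw [hstep, ih (i + 1) 1 (i * 128) _ (by norm_num) (by norm_num) (Or.inr (by ring)),
            fSpec_one_part xs i 0 (by norm_num)]
          norm_num
        · have hs : start = (i - n) * 128 := hstart.resolve_left hz
          have hstep : stepA (data, n, start) (i, 1) = (data, n + 1, start) := by
            simp [stepA, hz, h4]
          rw [hstep, ih (i + 1) (n + 1) start _ (by omega) (by omega) (Or.inr (by rw [hs]; ring)),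
            fSpec_one_part xs i n h4]
    · by_cases hz : n = 0
      · subst hz
        have hstep : stepA (data, 0, start) (i, x) = (data, 0, -2) := by
          simp [stepA, hx]
        rw [hstep, ih (i + 1) 0 (-2) _ le_rfl (by norm_num) (Or.inl rfl),
          fSpec_other xs x i 0 hx]
        simp
      · have hpos : (0 : Int) < n := by omega
        have hstep : stepA (data, n, start) (i, x)
            = (data ++ [((i - n) * 128, n * 128)], 0, -2) := by
          simp [stepA, hx, hpos]
        rw [hstep, ih (i + 1) 0 (-2) _ le_rfl (by norm_num) (Or.inl rfl),
          fSpec_other xs x i n hx]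
        simp [hz]

lemma packetData_eq_fSpec (mapped : List Int) :
    packetData mapped = fSpec mapped 0 0 := by
  have h1 : (PySem.List.pyRange 0 (PySem.List.len mapped) 1).foldl
      (fun st idx => stepA st (idx, PySem.List.pyGetD mapped idx 0)) ([], 0, -2)
      = (PySem.List.enumerate mapped).foldl stepA ([], 0, -2) := by
    rw [PySem.List.enumerate_eq_map_pyRange (d := 0), List.foldl_map]
  unfold packetData
  rw [h1, stepA_fold mapped 0 0 (-2) [] le_rfl (by norm_num) (Or.inl rfl)]
  simp

-- ----- B-side -----

-- pass 1 only appends to runs: the accumulator is a prefix of the result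
lemma runStep_prefix (xs : List Int) : ∀ (i r : Int) (rs : List (Int × Int)),
    (PySem.List.enumerate xs i).foldl runStep (rs, r)
      = (rs ++ ((PySem.List.enumerate xs i).foldl runStep ([], r)).1,
         ((PySem.List.enumerate xs i).foldl runStep ([], r)).2) := by
  induction xs with
  | nil => intro i r rs; simp [PySem.List.enumerate_nil]
  | cons x xs ih =>
    intro i r rs
    rw [PySem.List.enumerate_cons, List.foldl_cons, List.foldl_cons]
    by_cases hx : x = 1
    · have h1 : runStep (rs, r) (i, x) = (rs, r + 1) := by simp [runStep, hx]
      have h2 : runStep (([] : List (Int × Int)), r) (i, x) = ([], r + 1) := by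
        simp [runStep, hx]
      rw [h1, h2, ih (i + 1) (r + 1) rs]
    · by_cases hr : r = 0
      · have h1 : runStep (rs, r) (i, x) = (rs, 0) := by simp [runStep, hx, hr]
        have h2 : runStep (([] : List (Int × Int)), r) (i, x) = ([], 0) := by
          simp [runStep, hx, hr]
        rw [h1, h2, ih (i + 1) 0 rs]
      · have h1 : runStep (rs, r) (i, x) = (rs ++ [(i - r, r)], 0) := by
          simp [runStep, hx, hr]
        have h2 : runStep (([] : List (Int × Int)), r) (i, x) = ([(i - r, r)], 0) := by
          simp [runStep, hx, hr]
        rw [h1, h2, ih (i + 1) 0 (rs ++ [(i - r, r)]), ih (i + 1) 0 [(i - r, r)]]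
        simp

-- B's second pass is flatMap of emitRun
lemma second_pass_eq_flatMap (runs : List (Int × Int)) :
    ∀ (data : List (Int × Int)),
      runs.foldl emitStep data = data ++ runs.flatMap emitRun := by
  induction runs with
  | nil => intro data; simp
  | cons sl runs ih =>
    intro data
    have h : emitStep data sl = data ++ emitRun sl := by
      unfold emitStep emitRun
      dsimp only
      rw [PySem.List.foldl_append_singleton_eq_map]
      split_ifs <;> simp
    rw [List.foldl_cons, ih, h, List.flatMap_cons, List.append_assoc]

-- main B-side lemma: pass 1 + final flush + pass 2 compute gSpec
lemma runStep_fold (xs : List Int) : ∀ (i r N : Int), 0 ≤ r → i + (xs.length : Int) = N →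
    (if ((PySem.List.enumerate xs i).foldl runStep ([], r)).2 ≠ 0 then
        ((PySem.List.enumerate xs i).foldl runStep ([], r)).1 ++
          [(N - ((PySem.List.enumerate xs i).foldl runStep ([], r)).2,
            ((PySem.List.enumerate xs i).foldl runStep ([], r)).2)]
      else ((PySem.List.enumerate xs i).foldl runStep ([], r)).1).flatMap emitRun
      = donePk i r ++ gSpec xs i (r % 4) := by
  induction xs with
  | nil =>
    intro i r N hr hN
    have hiN : i = N := by simpa using hN
    subst hiN
    by_cases h : r = 0
    · subst h
      simp [PySem.List.enumerate_nil, donePk_zero, gSpec]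
    · simp only [PySem.List.enumerate_nil, List.foldl_nil]
      rw [if_pos (by simpa using h)]
      rw [show ((([] : List (Int × Int)), r).1 ++
          [(i - (([] : List (Int × Int)), r).2, (([] : List (Int × Int)), r).2)]).flatMap
          emitRun = emitRun (i - r, r) from by simp]
      rw [emitRun_eq i r]
      rfl
  | cons x xs ih =>
    intro i r N hr hN
    have hN' : (i + 1) + (xs.length : Int) = N := by
      simp only [List.length_cons] at hN; push_cast at hN ⊢; omega
    rw [PySem.List.enumerate_cons, List.foldl_cons]
    by_cases hx : x = 1
    · subst hx
      have hstep : runStep (([] : List (Int × Int)), r) (i, 1) = ([], r + 1) := by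
        simp [runStep]
      rw [hstep, ih (i + 1) (r + 1) N (by omega) hN']
      by_cases h3 : r % 4 = 3
      · rw [donePk_succ_full i r hr h3, show (r + 1) % 4 = 0 from by omega,
          gSpec_one_full xs i (r % 4) (by omega)]
        simp [h3]
      · rw [donePk_succ_small i r hr (by omega), show (r + 1) % 4 = r % 4 + 1 from by omega,
          gSpec_one_part xs i (r % 4) (by omega)]
    · by_cases hr0 : r = 0
      · subst hr0
        have hstep : runStep (([] : List (Int × Int)), 0) (i, x) = ([], 0) := by
          simp [runStep, hx]
        rw [hstep, ih (i + 1) 0 N le_rfl hN']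
        norm_num [gSpec_other xs x i 0 hx, donePk_zero]
      · have hstep : runStep (([] : List (Int × Int)), r) (i, x) = ([(i - r, r)], 0) := by
          simp [runStep, hx, hr0]
        rw [hstep, runStep_prefix xs (i + 1) 0 [(i - r, r)]]
        dsimp only
        have key := ih (i + 1) 0 N le_rfl hN'
        rw [donePk_zero, List.nil_append] at key
        norm_num at key
        have hmod : ¬ r % 4 = 0 ∨ r % 4 = 0 := (em _).symm.imp id id
        have hflush : List.flatMap emitRun [((i : Int) - r, r)]
            = donePk i r ++ (if r % 4 = 0 then [] else [((i - r % 4) * 128, r % 4 * 128)]) := by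
          rw [show List.flatMap emitRun [((i : Int) - r, r)] = emitRun (i - r, r) from by simp,
            emitRun_eq i r]
        by_cases hF : ((PySem.List.enumerate xs (i + 1)).foldl runStep ([], 0)).2 ≠ 0
        · rw [if_pos hF]
          rw [if_neg hF] at key
          try simp only [List.append_assoc]
          rw [List.flatMap_append, key, hflush, gSpec_other xs x i (r % 4) hx]
          have hmm : 0 ≤ r % 4 := Int.emod_nonneg r (by norm_num)
          have hmm4 : r % 4 < 4 := Int.emod_lt_of_pos r (by norm_num)
          by_cases h0 : r % 4 = 0 <;> simp [h0, List.append_assoc]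
        · rw [if_neg hF]
          rw [if_pos (not_ne_iff.mp hF)] at key
          rw [List.flatMap_append, key, hflush, gSpec_other xs x i (r % 4) hx]
          by_cases h0 : r % 4 = 0 <;> simp [h0, List.append_assoc]

lemma packetData_alt_eq_gSpec (mapped : List Int) :
    packetData_alt mapped = gSpec mapped 0 0 := by
  have h := runStep_fold mapped 0 0 (mapped.length : Int) le_rfl (by simp)
  rw [donePk_zero, List.nil_append] at h
  show (if ((PySem.List.enumerate mapped).foldl runStep ([], 0)).2 ≠ 0 then
      ((PySem.List.enumerate mapped).foldl runStep ([], 0)).1 ++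
        [((mapped.length : Int) - ((PySem.List.enumerate mapped).foldl runStep ([], 0)).2,
          ((PySem.List.enumerate mapped).foldl runStep ([], 0)).2)]
    else ((PySem.List.enumerate mapped).foldl runStep ([], 0)).1).foldl
      emitStep [] = gSpec mapped 0 0
  rw [second_pass_eq_flatMap]
  simpa using h

-- ----- bridge: gSpec = fSpec ++ trailing remainder -----
-- length (before mod 4) of the run carried at the end, starting from carry n
def mEnd (xs : List Int) (n : Int) : Int :=
  if xs.all (fun y => y == 1) then n + (xs.length : Int) else (trailOnes xs : Int)

-- the remainder packet of the final carried run
def remPk (xs : List Int) (i n : Int) : List (Int × Int) :=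
  if mEnd xs n % 4 = 0 then []
  else [((i + (xs.length : Int) - mEnd xs n % 4) * 128, mEnd xs n % 4 * 128)]

lemma trailOnes_all (xs : List Int) (h : xs.all (fun y => y == 1) = true) :
    (trailOnes xs : Int) = (xs.length : Int) := by
  induction xs with
  | nil => simp [trailOnes]
  | cons x xs ih =>
    simp only [List.all_cons, Bool.and_eq_true, beq_iff_eq] at h
    simp [trailOnes, h.1, h.2]

lemma mEnd_cons_one_full (xs : List Int) (n : Int) (h : n + 1 = 4) :
    mEnd (1 :: xs) n % 4 = mEnd xs 0 % 4 := by
  unfold mEnd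
  by_cases hall : xs.all (fun y => y == 1) = true
  · simp only [List.all_cons, hall, Bool.and_true, beq_self_eq_true, if_true,
      List.length_cons]
    push_cast
    omega
  · simp [trailOnes, hall]

lemma mEnd_cons_one_part (xs : List Int) (n : Int) :
    mEnd (1 :: xs) n % 4 = mEnd xs (n + 1) % 4 := by
  unfold mEnd
  by_cases hall : xs.all (fun y => y == 1) = true
  · simp only [List.all_cons, hall, Bool.and_true, beq_self_eq_true, if_true,
      List.length_cons]
    push_cast
    omega
  · simp [trailOnes, hall]

lemma mEnd_cons_other (xs : List Int) (x n : Int) (hx : ¬ x = 1) :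
    mEnd (x :: xs) n = mEnd xs 0 := by
  unfold mEnd
  have hc : (x :: xs).all (fun y => y == 1) = false := by
    simp [List.all_cons, hx]
  rw [if_neg (by simp [hc])]
  have ht : trailOnes (x :: xs) = trailOnes xs := by simp [trailOnes, hx]
  rw [ht]
  by_cases hall : xs.all (fun y => y == 1) = true
  · rw [if_pos hall, trailOnes_all _ hall]; ring
  · rw [if_neg hall]

lemma remPk_cons (x : Int) (xs : List Int) (i n n' : Int)
    (h : mEnd (x :: xs) n % 4 = mEnd xs n' % 4) :
    remPk (x :: xs) i n = remPk xs (i + 1) n' := by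
  unfold remPk
  rw [h, show i + (((x :: xs).length : Nat) : Int) = (i + 1) + (xs.length : Int) from by
    simp only [List.length_cons]; push_cast; ring]

lemma gSpec_eq_fSpec_append (xs : List Int) : ∀ (i n : Int), 0 ≤ n → n < 4 →
    gSpec xs i n = fSpec xs i n ++ remPk xs i n := by
  induction xs with
  | nil =>
    intro i n hn0 hn4
    have hm : ∀ k : Int, mEnd ([] : List Int) k = k := by intro k; simp [mEnd]
    have hn : n % 4 = n := Int.emod_eq_of_lt hn0 hn4
    by_cases h : n = 0
    · subst h
      simp [gSpec, fSpec, remPk, hm]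
    · rw [show gSpec [] i n = [((i - n) * 128, n * 128)] from by simp [gSpec, h],
        show fSpec [] i n = ([] : List (Int × Int)) from rfl]
      unfold remPk
      rw [hm n, hn, if_neg h]
      simp
  | cons x xs ih =>
    intro i n hn0 hn4
    by_cases hx : x = 1
    · subst hx
      by_cases h4 : n + 1 = 4
      · rw [gSpec_one_full xs i n h4, fSpec_one_full xs i n h4,
          ih (i + 1) 0 le_rfl (by norm_num),
          remPk_cons 1 xs i n 0 (mEnd_cons_one_full xs n h4)]
        simp
      · rw [gSpec_one_part xs i n h4, fSpec_one_part xs i n h4,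
          ih (i + 1) (n + 1) (by omega) (by omega),
          remPk_cons 1 xs i n (n + 1) (mEnd_cons_one_part xs n)]
    · rw [gSpec_other xs x i n hx, fSpec_other xs x i n hx,
        ih (i + 1) 0 le_rfl (by norm_num),
        remPk_cons x xs i n 0 (by rw [mEnd_cons_other xs x n hx])]
      simp [List.append_assoc]

lemma mEnd_zero (xs : List Int) : mEnd xs 0 = (trailOnes xs : Int) := by
  unfold mEnd
  by_cases hall : xs.all (fun y => y == 1) = true
  · rw [if_pos hall, trailOnes_all _ hall]; ring
  · rw [if_neg hall]

lemma alt_eq_a_append (mapped : List Int) :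
    packetData_alt mapped = packetData mapped ++ remPk mapped 0 0 := by
  rw [packetData_alt_eq_gSpec, packetData_eq_fSpec,
    gSpec_eq_fSpec_append mapped 0 0 le_rfl (by norm_num)]

lemma D_iff_rem (mapped : List Int) :
    D_packetData mapped ↔ remPk mapped 0 0 ≠ [] := by
  unfold D_packetData remPk
  rw [mEnd_zero]
  by_cases hm : trailOnes mapped % 4 = 0
  · have h : (trailOnes mapped : Int) % 4 = 0 := by omega
    simp [h, hm]
  · have h : ¬ (trailOnes mapped : Int) % 4 = 0 := by omega
    simp [h, hm]

-- ===== VERDICT (by name: the statements are the Claim_ definitions above) =====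
theorem packetData_spec : Claim_unchanged_packetData := by
  intro mapped _ hND
  have hrem : remPk mapped 0 0 = [] := by
    by_contra h
    exact hND ((D_iff_rem mapped).mpr h)
  rw [alt_eq_a_append, hrem, List.append_nil]

theorem packetData_changed : Claim_changed_packetData := by
  unfold Claim_changed_packetData; decide

theorem packetData_tight : Claim_exact_packetData := by
  intro mapped _ hD heq
  have h := alt_eq_a_append mapped
  rw [← heq] at h
  have hne := (D_iff_rem mapped).mp hD
  have : (packetData mapped).length = (packetData mapped).length + (remPk mapped 0 0).length := by
    conv_lhs => rw [h]
    simp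
  have : (remPk mapped 0 0).length = 0 := by omega
  exact hne (List.length_eq_zero_iff.mp this)
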